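-- pv_equiv track=rewrite | github.com/AlexSilva91/relatorio-atividades | test/pegar_auxiliar_atividade.py | processar_tecnicos_atividades
-- ===== SOURCE A (Python) =====
-- from collections import Counter, OrderedDict
-- from collections import OrderedDict
--
-- def processar_tecnicos_atividades(contagem_atividades, tecnicos_a_evitar):
--     tecnicos_atividades = {}
--
--     for (tecnico, atividade), contagem in contagem_atividades.items():
--         if not isinstance(tecnico, str) or tecnico.strip() == "":
--             continue
--
--         if tecnico not in tecnicos_a_evitar:
--             if tecnico not in tecnicos_atividades:
--                 tecnicos_atividades[tecnico] = {}
--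
--             tecnicos_atividades[tecnico][atividade] = contagem
--
--     return OrderedDict(sorted(tecnicos_atividades.items()))
-- ===== SOURCE B (Python) =====
-- from collections import OrderedDict
--
--
-- def processar_tecnicos_atividades(contagem_atividades, tecnicos_a_evitar):
--     validos = [tecnico for (tecnico, atividade) in contagem_atividades
--                if isinstance(tecnico, str) and tecnico.strip() != ""
--                and tecnico not in tecnicos_a_evitar]
--
--     resultado = OrderedDict()
--     for tecnico in sorted(set(validos)):
--         atividades = {}
--         for (t, atividade), contagem in contagem_atividades.items():
--             if t == tecnico:
--                 atividades[atividade] = contagem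
--         resultado[tecnico] = atividades
--     return resultado
-- ===== Notes on version B (the rewrite author's own statement) =====
-- stated objective: alternative
-- what changed: Instead of one pass accumulating a dict-of-dicts and sorting its keys at the end, B first collects the valid technician names, then iterates sorted(set(names)) and builds each technician's activity dict by its own scan of the input; this trades A's single-pass bookkeeping for one simple scan per distinct technician (slower when there are many technicians).
import Mathlib
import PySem

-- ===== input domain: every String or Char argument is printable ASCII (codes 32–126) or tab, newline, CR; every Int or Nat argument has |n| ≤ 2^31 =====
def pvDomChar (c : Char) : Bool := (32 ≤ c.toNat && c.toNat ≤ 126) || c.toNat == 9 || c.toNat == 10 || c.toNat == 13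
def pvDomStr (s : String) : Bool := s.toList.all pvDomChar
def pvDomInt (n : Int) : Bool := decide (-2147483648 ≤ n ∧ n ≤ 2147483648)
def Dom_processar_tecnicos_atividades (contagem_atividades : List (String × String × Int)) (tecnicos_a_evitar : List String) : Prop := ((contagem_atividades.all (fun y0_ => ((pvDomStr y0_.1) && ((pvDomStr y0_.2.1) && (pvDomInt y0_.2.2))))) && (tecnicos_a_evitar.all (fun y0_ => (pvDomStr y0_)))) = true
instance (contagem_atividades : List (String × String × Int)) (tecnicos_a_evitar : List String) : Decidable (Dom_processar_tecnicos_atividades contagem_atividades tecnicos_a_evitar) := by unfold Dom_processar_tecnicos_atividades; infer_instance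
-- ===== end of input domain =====

-- B replaces A's one-pass dict-of-dicts (populate, then sort the keys) by: collect the valid
-- technician names, iterate sorted(set(names)) and build each technician's activity dict by its
-- own pass over the input — an 'alternative' decomposition, not claimed faster.

-- ===== PORT A =====
-- loop body of A's 'for (tecnico, atividade), contagem in contagem_atividades.items():'
-- (tecnico is always a str under the type convention, so 'not isinstance(tecnico, str)' is False;
--  'tecnicos_atividades[tecnico][atividade] = contagem' is Dict.modify at a key known present;
--  'sorted(tecnicos_atividades.items())' compares tuples, but keys are unique so only the first
--  component is ever compared — ported as sorting by the key)
def processar_tecnicos_atividades_loop (tecnicos_a_evitar : List String)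
    (tecnicos_atividades : PySem.Dict String (PySem.Dict String Int))
    (p : String × String × Int) : PySem.Dict String (PySem.Dict String Int) :=
  if PySem.Str.strip p.1 == "" then tecnicos_atividades
  else if !(tecnicos_a_evitar.contains p.1) then
    let d := if tecnicos_atividades.contains p.1 then tecnicos_atividades
             else tecnicos_atividades.insert p.1 PySem.Dict.empty
    d.modify p.1 PySem.Dict.empty (fun m => m.insert p.2.1 p.2.2)
  else tecnicos_atividades

def processar_tecnicos_atividades (contagem_atividades : List (String × String × Int)) (tecnicos_a_evitar : List String) : List (String × List (String × Int)) :=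
  let tecnicos_atividades :=
    contagem_atividades.foldl (processar_tecnicos_atividades_loop tecnicos_a_evitar) PySem.Dict.empty
  (PySem.List.sorted tecnicos_atividades.items (fun q => q.1) false).map (fun q => (q.1, q.2.items))

-- ===== PORT B =====
-- inner loop of B: 'for (t, atividade), contagem in contagem_atividades.items(): if t == tecnico: …'
def processar_tecnicos_atividades_alt_inner (contagem_atividades : List (String × String × Int)) (tecnico : String) : PySem.Dict String Int :=
  contagem_atividades.foldl
    (fun atividades p => if p.1 == tecnico then atividades.insert p.2.1 p.2.2 else atividades)
    PySem.Dict.empty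

def processar_tecnicos_atividades_alt (contagem_atividades : List (String × String × Int)) (tecnicos_a_evitar : List String) : List (String × List (String × Int)) :=
  let validos :=
    (contagem_atividades.filter
      (fun p => !(PySem.Str.strip p.1 == "") && !(tecnicos_a_evitar.contains p.1))).map (fun p => p.1)
  (PySem.List.sorted (PySem.Set.ofList validos) (fun t => t) false).map
    (fun tecnico => (tecnico, (processar_tecnicos_atividades_alt_inner contagem_atividades tecnico).items))

-- ===== PRECONDITION & SPEC =====
def Spec_processar_tecnicos_atividades (contagem_atividades : List (String × String × Int)) (tecnicos_a_evitar : List String) (out : List (String × List (String × Int))) : Prop := out = processar_tecnicos_atividades_alt contagem_atividades tecnicos_a_evitar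
instance (contagem_atividades : List (String × String × Int)) (tecnicos_a_evitar : List String) (out : List (String × List (String × Int))) : Decidable (Spec_processar_tecnicos_atividades contagem_atividades tecnicos_a_evitar out) := by unfold Spec_processar_tecnicos_atividades; infer_instance

-- ===== CLAIM (what is proved, stated in full; the proofs are below) =====
def Claim_equal_processar_tecnicos_atividades : Prop := ∀ (contagem_atividades : List (String × String × Int)) (tecnicos_a_evitar : List String), Dom_processar_tecnicos_atividades contagem_atividades tecnicos_a_evitar → Spec_processar_tecnicos_atividades contagem_atividades tecnicos_a_evitar (processar_tecnicos_atividades contagem_atividades tecnicos_a_evitar)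

-- ===== LEMMAS AND PROOFS =====

-- the two guards of both programs, as one predicate on an item
def pvValid (ev : List String) (p : String × String × Int) : Bool :=
  !(PySem.Str.strip p.1 == "") && !(ev.contains p.1)

lemma loopA_invalid (ev : List String) (d : PySem.Dict String (PySem.Dict String Int))
    (p : String × String × Int) (h : pvValid ev p = false) :
    processar_tecnicos_atividades_loop ev d p = d := by
  unfold pvValid at h
  unfold processar_tecnicos_atividades_loop
  rcases Bool.and_eq_false_iff.mp h with h1 | h2
  · simp only [Bool.not_eq_false'] at h1
    simp [h1]
  · simp only [Bool.not_eq_false'] at h2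
    have hm : p.1 ∈ ev := by simpa using h2
    by_cases hs : (PySem.Str.strip p.1 == "") = true
    · simp [hs]
    · simp [hs, hm]

lemma loopA_valid (ev : List String) (d : PySem.Dict String (PySem.Dict String Int))
    (p : String × String × Int) (h : pvValid ev p = true) :
    processar_tecnicos_atividades_loop ev d p =
      (if d.contains p.1 then d else d.insert p.1 PySem.Dict.empty).modify p.1 PySem.Dict.empty
        (fun m => m.insert p.2.1 p.2.2) := by
  unfold pvValid at h
  rcases Bool.and_eq_true_iff.mp h with ⟨h1, h2⟩
  simp only [Bool.not_eq_eq_eq_not, Bool.not_true] at h1 h2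
  have hm : p.1 ∉ ev := by simpa using h2
  unfold processar_tecnicos_atividades_loop
  simp [h1, hm]

lemma keys_foldA (ev : List String) :
    ∀ (l : List (String × String × Int)) (d : PySem.Dict String (PySem.Dict String Int)),
      (l.foldl (processar_tecnicos_atividades_loop ev) d).keys =
        PySem.Set.update d.keys ((l.filter (pvValid ev)).map (fun p => p.1)) := by
  intro l
  induction l with
  | nil => intro d; simp [PySem.Set.update]
  | cons p t ih =>
    intro d
    by_cases h : pvValid ev p = true
    · rw [List.foldl_cons, loopA_valid ev d p h, ih]
      have hk : ((if d.contains p.1 then d else d.insert p.1 PySem.Dict.empty).modify p.1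
          PySem.Dict.empty (fun m => m.insert p.2.1 p.2.2)).keys = PySem.Set.add d.keys p.1 := by
        rw [PySem.Dict.keys_modify]
        by_cases hc : d.contains p.1 = true
        · have hmem : p.1 ∈ d.keys := (PySem.Dict.contains_iff_mem_keys d p.1).mp hc
          rw [if_pos hc, PySem.Dict.keys_insert_of_contains d _ hc]
          simp [PySem.Set.add, hmem]
        · have hc' : d.contains p.1 = false := by simpa using hc
          have hmem : p.1 ∉ d.keys :=
            fun hmem => hc ((PySem.Dict.contains_iff_mem_keys d p.1).mpr hmem)
          rw [if_neg (by simp [hc']),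
            PySem.Dict.keys_insert_of_contains _ _
              (PySem.Dict.contains_insert_self d p.1 PySem.Dict.empty),
            PySem.Dict.keys_insert_of_not_contains d _ hc']
          simp [PySem.Set.add, hmem]
      rw [hk, List.filter_cons_of_pos h, List.map_cons]
      rfl
    · have h' : pvValid ev p = false := by simpa using h
      rw [List.foldl_cons, loopA_invalid ev d p h', ih, List.filter_cons_of_neg (by simp [h'])]

lemma getD_foldA (ev : List String) (t : String) :
    ∀ (l : List (String × String × Int)) (d : PySem.Dict String (PySem.Dict String Int)),
      (l.foldl (processar_tecnicos_atividades_loop ev) d).getD t PySem.Dict.empty =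
        ((l.filter (fun p => pvValid ev p && (p.1 == t))).foldl
          (fun m p => m.insert p.2.1 p.2.2) (d.getD t PySem.Dict.empty)) := by
  intro l
  induction l with
  | nil => intro d; simp
  | cons p tl ih =>
    intro d
    by_cases h : pvValid ev p = true
    · rw [List.foldl_cons, loopA_valid ev d p h, ih]
      by_cases ht : p.1 = t
      · subst ht
        have hpre : (if d.contains p.1 then d else d.insert p.1 PySem.Dict.empty).getD p.1
            PySem.Dict.empty = d.getD p.1 PySem.Dict.empty := by
          by_cases hc : d.contains p.1 = true
          · simp [hc]
          · simp only [Bool.not_eq_true] at hc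
            simp [hc, PySem.Dict.getD_insert_self,
              PySem.Dict.getD_of_not_contains d PySem.Dict.empty hc]
        rw [PySem.Dict.getD_modify_self, hpre,
          List.filter_cons_of_pos (by simp [h]), List.foldl_cons]
      · rw [PySem.Dict.getD_modify_of_ne _ _ _ (Ne.symm ht)]
        have hpre : (if d.contains p.1 then d else d.insert p.1 PySem.Dict.empty).getD t
            PySem.Dict.empty = d.getD t PySem.Dict.empty := by
          by_cases hc : d.contains p.1 = true
          · simp [hc]
          · simp [hc, PySem.Dict.getD_insert_of_ne d PySem.Dict.empty PySem.Dict.empty (Ne.symm ht)]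
        rw [hpre, List.filter_cons_of_neg (by simp [ht])]
    · have h' : pvValid ev p = false := by simpa using h
      rw [List.foldl_cons, loopA_invalid ev d p h', ih,
        List.filter_cons_of_neg (by simp [h'])]

-- B's inner pass over the whole list equals folding the matching items only
lemma inner_eq_filter (t : String) :
    ∀ (l : List (String × String × Int)) (m : PySem.Dict String Int),
      l.foldl (fun m p => if p.1 == t then m.insert p.2.1 p.2.2 else m) m =
        (l.filter (fun p => p.1 == t)).foldl (fun m p => m.insert p.2.1 p.2.2) m := by
  intro l
  induction l with
  | nil => intro m; rfl
  | cons p tl ih =>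
    intro m
    by_cases h : p.1 = t
    · rw [List.foldl_cons, List.filter_cons_of_pos (by simp [h]), List.foldl_cons]
      simp only [h, BEq.rfl, if_true]
      exact ih _
    · rw [List.foldl_cons, List.filter_cons_of_neg (by simp [h])]
      simp only [beq_eq_false_iff_ne.mpr h, Bool.false_eq_true, if_false]
      exact ih _

-- when t itself passes the guards, the validity guard inside the filter is redundant
lemma filter_valid_eq (ev : List String) (t : String)
    (hv : (!(PySem.Str.strip t == "") && !(ev.contains t)) = true)
    (l : List (String × String × Int)) :
    l.filter (fun p => pvValid ev p && (p.1 == t)) = l.filter (fun p => p.1 == t) := by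
  apply List.filter_congr
  intro p _
  by_cases h : p.1 = t
  · simp only [pvValid, h, hv, BEq.rfl, Bool.and_true]
  · simp [beq_eq_false_iff_ne.mpr h]

-- ===== VERDICT (by name: the statement is the Claim_ definition above) =====
theorem processar_tecnicos_atividades_spec : Claim_equal_processar_tecnicos_atividades := by
  intro ca ev _
  unfold Spec_processar_tecnicos_atividades
  unfold processar_tecnicos_atividades processar_tecnicos_atividades_alt
  simp only []
  set L := (ca.filter (fun p => !(PySem.Str.strip p.1 == "") && !(ev.contains p.1))).map
    (fun p => p.1) with hL
  have hLpv : (ca.filter (pvValid ev)).map (fun p => p.1) = L := rfl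
  set D := ca.foldl (processar_tecnicos_atividades_loop ev) PySem.Dict.empty with hD
  have hkeys : D.keys = PySem.Set.ofList L := by
    rw [hD, keys_foldA, hLpv, PySem.Dict.keys_empty]
    exact PySem.Set.update_empty L
  have hnd : D.keys.Nodup := by rw [hkeys]; exact PySem.Set.nodup_ofList L
  have hitems : D.items = (PySem.Set.ofList L).map (fun k => (k, D.getD k PySem.Dict.empty)) := by
    rw [PySem.Dict.items_eq_map_keys D hnd PySem.Dict.empty, hkeys]
  -- name the sorted order of the items: the key-sorted set, mapped
  have hsorted : PySem.List.sorted D.items (fun q => q.1) false =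
      (PySem.List.sorted (PySem.Set.ofList L) (fun t => t) false).map
        (fun k => (k, D.getD k PySem.Dict.empty)) := by
    apply PySem.List.sorted_eq_of_perm_of_pairwise_lt
    · rw [hitems]
      exact List.Perm.map _ (PySem.List.sorted_perm _ _ _)
    · have := PySem.List.sorted_ofList_pairwise_lt (xs := L)
      exact List.Pairwise.map _ (fun a b h => h) this
  rw [hsorted, List.map_map]
  apply List.map_congr_left
  intro t ht
  have htL : t ∈ L := by
    have := (PySem.List.mem_sorted _ _ _ t).mp ht
    exact (PySem.Set.mem_ofList _ _).mp this
  have hvt : (!(PySem.Str.strip t == "") && !(ev.contains t)) = true := by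
    rw [hL] at htL
    rcases List.mem_map.mp htL with ⟨p, hp, hpt⟩
    rcases List.mem_filter.mp hp with ⟨_, hpv⟩
    rw [← hpt]; exact hpv
  have hget : D.getD t PySem.Dict.empty = processar_tecnicos_atividades_alt_inner ca t := by
    rw [hD, getD_foldA, PySem.Dict.getD_empty, filter_valid_eq ev t hvt,
      processar_tecnicos_atividades_alt_inner, inner_eq_filter]
  simp [hget]
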